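-- pv_equiv track=rewrite | github.com/mohithlingosme/NitiNova | judgementcopy_management_system/pipeline/section_detector.py | _select_key_paragraphs
-- ===== SOURCE A (Python) =====
-- from typing import Dict, List, Tuple
--
-- def _select_key_paragraphs(paragraphs: List[str], limit: int = 8) -> str:
--     """
--     Picks top paragraphs by presence of legal cue words and length.
--     """
--     cues = ("held", "therefore", "hence", "court", "tribunal", "appeal", "petition", "ratio")
--     scored = []
--     for para in paragraphs:
--         score = sum(1 for c in cues if c in para.lower()) + min(len(para) // 400, 2)
--         scored.append((score, para))
--     scored.sort(key=lambda x: x[0], reverse=True)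
--     selected = [p for _, p in scored[:limit]]
--     return "\n\n".join(selected)
-- ===== SOURCE B (Python) =====
-- def _select_key_paragraphs(paragraphs, limit=8):
--     """
--     Bucket (counting) selection: scores are bounded integers in 0..10, so group
--     paragraphs by score in one pass and read the buckets from high to low.
--     """
--     cues = ("held", "therefore", "hence", "court", "tribunal", "appeal", "petition", "ratio")
--     scored = [(sum(1 for c in cues if c in p.lower()) + min(len(p) // 400, 2), p) for p in paragraphs]
--     ordered = [p for v in range(10, -1, -1) for s, p in scored if s == v]
--     return "\n\n".join(ordered[:limit])
-- ===== Notes on version B (the rewrite author's own statement) =====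
-- stated objective: alternative
-- what changed: Replaces the stable comparison sort on scores with a single-pass bucket (counting-sort) grouping over the bounded score range 10..0, concatenated high-to-low before slicing and joining.
import Mathlib
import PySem

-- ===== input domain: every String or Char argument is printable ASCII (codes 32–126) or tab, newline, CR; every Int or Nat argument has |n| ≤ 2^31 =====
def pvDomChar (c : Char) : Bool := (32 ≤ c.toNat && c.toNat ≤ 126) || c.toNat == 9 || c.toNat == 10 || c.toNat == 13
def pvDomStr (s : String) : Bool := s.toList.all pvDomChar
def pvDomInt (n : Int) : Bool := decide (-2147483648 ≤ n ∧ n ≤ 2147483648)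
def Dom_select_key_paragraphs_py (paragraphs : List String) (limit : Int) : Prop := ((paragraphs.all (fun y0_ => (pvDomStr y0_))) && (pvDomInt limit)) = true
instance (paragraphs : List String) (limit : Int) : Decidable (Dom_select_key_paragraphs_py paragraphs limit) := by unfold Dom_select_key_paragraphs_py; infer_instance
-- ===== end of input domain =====

-- B replaces the stable comparison sort on scores by a bucket pass over the bounded score range 10..0 (same selection, same order); objective: alternative algorithm.

-- ===== PORT A =====
-- the cue tuple and the score formula, shared verbatim by both Pythons
def pvCues : List String := ["held", "therefore", "hence", "court", "tribunal", "appeal", "petition", "ratio"]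

def pvScore (para : String) : Int :=
  ((pvCues.filter (fun c => PySem.Str.isIn c (PySem.Str.lower para))).map (fun _ => (1 : Int))).sum
    + min (PySem.Int.floordiv (PySem.Str.len para) 400) 2

def select_key_paragraphs_py (paragraphs : List String) (limit : Int) : String :=
  let scored := paragraphs.map (fun para => (pvScore para, para))
  let sortedScored := PySem.List.sorted scored (fun x => x.1) true
  let selected := (PySem.List.slice sortedScored none (some limit)).map (fun x => x.2)
  PySem.Str.join "\n\n" selected

-- ===== PORT B =====
def select_key_paragraphs_py_alt (paragraphs : List String) (limit : Int) : String :=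
  let scored := paragraphs.map (fun para => (pvScore para, para))
  let ordered := (PySem.List.pyRange 10 (-1) (-1)).flatMap
    (fun v => (scored.filter (fun x => x.1 == v)).map (fun x => x.2))
  PySem.Str.join "\n\n" (PySem.List.slice ordered none (some limit))

-- ===== PRECONDITION & SPEC =====
def Spec_select_key_paragraphs_py (paragraphs : List String) (limit : Int) (out : String) : Prop := out = select_key_paragraphs_py_alt paragraphs limit
instance (paragraphs : List String) (limit : Int) (out : String) : Decidable (Spec_select_key_paragraphs_py paragraphs limit out) := by unfold Spec_select_key_paragraphs_py; infer_instance

-- ===== CLAIM (what is proved, stated in full; the proofs are below) =====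
def Claim_equal_select_key_paragraphs_py : Prop := ∀ (paragraphs : List String) (limit : Int), Dom_select_key_paragraphs_py paragraphs limit → Spec_select_key_paragraphs_py paragraphs limit (select_key_paragraphs_py paragraphs limit)

-- ===== LEMMAS AND PROOFS =====

theorem pv_flatMap_congr {α β : Type} {l : List α} {f g : α → List β}
    (h : ∀ x ∈ l, f x = g x) : l.flatMap f = l.flatMap g := by
  induction l with
  | nil => rfl
  | cons a l ih =>
    simp only [List.flatMap_cons, h a (by simp), ih (fun x hx => h x (by simp [hx]))]

theorem pv_insertBy_cons {α : Type} (before : α → α → Bool) (x y : α) (ys : List α) :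
    PySem.List.insertBy before x (y :: ys) =
      if before x y then x :: y :: ys else y :: PySem.List.insertBy before x ys := rfl

theorem pv_insertBy_append_of_not {α : Type} (before : α → α → Bool) (x : α)
    (A B : List α) (h : ∀ y ∈ A, before x y = false) :
    PySem.List.insertBy before x (A ++ B) = A ++ PySem.List.insertBy before x B := by
  induction A with
  | nil => simp
  | cons a A ih =>
    simp only [List.cons_append, pv_insertBy_cons, h a (by simp)]
    simp only [Bool.false_eq_true, if_false, ih (fun y hy => h y (by simp [hy]))]

theorem pv_insertBy_of_forall_before {α : Type} (before : α → α → Bool) (x : α)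
    (B : List α) (h : ∀ y ∈ B, before x y = true) :
    PySem.List.insertBy before x B = x :: B := by
  cases B with
  | nil => rfl
  | cons b B => simp [pv_insertBy_cons, h b (by simp)]

/-- Inserting one element into the bucket concatenation appends it to its own bucket. -/
theorem pv_bucket_insert {α : Type} (key : α → Int) (x : α) (l : List α) (V : List Int)
    (hpw : V.Pairwise (fun a b => b < a)) (hx : key x ∈ V) :
    PySem.List.insertBy (fun a b => decide (key b < key a)) x
      (V.flatMap (fun v => l.filter (fun y => key y == v))) =
    V.flatMap (fun v => (l ++ [x]).filter (fun y => key y == v)) := by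
  induction V with
  | nil => simp at hx
  | cons v V ih =>
    rcases List.pairwise_cons.mp hpw with ⟨hv, hpw'⟩
    simp only [List.flatMap_cons]
    by_cases hxv : key x = v
    · have h1 : List.filter (fun y => key y == v) (l ++ [x]) =
          List.filter (fun y => key y == v) l ++ [x] := by
        simp [List.filter_append, hxv]
      have h2 : V.flatMap (fun w => (l ++ [x]).filter (fun y => key y == w)) =
          V.flatMap (fun w => l.filter (fun y => key y == w)) := by
        apply pv_flatMap_congr
        intro w hw
        have hwv : w < v := hv w hw
        have : ¬ (key x = w) := by omega
        simp [List.filter_append, this]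
      rw [h1, h2]
      rw [pv_insertBy_append_of_not]
      · rw [pv_insertBy_of_forall_before]
        · simp
        · intro y hy
          simp only [List.mem_flatMap, List.mem_filter] at hy
          rcases hy with ⟨w, hw, _, hkey⟩
          have hyw : key y = w := by simpa using hkey
          have : key y < key x := by rw [hyw, hxv]; exact hv w hw
          simp [this]
      · intro y hy
        have : key y = v := by simp only [List.mem_filter] at hy; simpa using hy.2
        simp [this, hxv]
    · have hx' : key x ∈ V := by
        rcases List.mem_cons.mp hx with h | h
        · exact absurd h hxv
        · exact h
      have hxlt : key x < v := hv _ hx'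
      have h1 : List.filter (fun y => key y == v) (l ++ [x]) = List.filter (fun y => key y == v) l := by
        simp [List.filter_append, hxv]
      rw [h1]
      rw [pv_insertBy_append_of_not]
      · rw [ih hpw' hx']
      · intro y hy
        have hyv : key y = v := by simp only [List.mem_filter] at hy; simpa using hy.2
        have : ¬ (key y < key x) := by omega
        simp [this]

/-- The stable reverse sort by a key with values in a strictly decreasing list V
is the concatenation of the buckets of V in order. -/
theorem pv_sorted_rev_eq_buckets {α : Type} (key : α → Int) (xs : List α) (V : List Int)
    (hpw : V.Pairwise (fun a b => b < a)) (hmem : ∀ x ∈ xs, key x ∈ V) :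
    PySem.List.sorted xs key true = V.flatMap (fun v => xs.filter (fun y => key y == v)) := by
  rw [PySem.List.sorted_rev_eq_foldl_insertBy]
  induction xs using List.reverseRecOn with
  | nil => simp
  | append_singleton l x ih =>
    rw [List.foldl_append]
    simp only [List.foldl_cons, List.foldl_nil]
    rw [ih (fun y hy => hmem y (by simp [hy]))]
    exact pv_bucket_insert key x l V hpw (hmem x (by simp))

theorem pv_sum_ones (l : List String) : ((l.map fun _ => (1 : Int)).sum = (l.length : Int)) := by
  induction l with
  | nil => rfl
  | cons a l _ => simp; ring

theorem pv_score_bounds (s : String) : 0 ≤ pvScore s ∧ pvScore s ≤ 10 := by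
  unfold pvScore
  rw [pv_sum_ones]
  have hlen : (List.filter (fun c => PySem.Str.isIn c (PySem.Str.lower s)) pvCues).length ≤ 8 := by
    have := List.length_filter_le (fun c => PySem.Str.isIn c (PySem.Str.lower s)) pvCues
    simpa [pvCues] using this
  have hfd : 0 ≤ PySem.Int.floordiv (PySem.Str.len s) 400 := by
    rw [PySem.Int.floordiv_eq_ediv_of_pos (by norm_num)]
    exact Int.ediv_nonneg (by rw [PySem.Str.len_eq]; positivity) (by norm_num)
  constructor
  · have : (0:Int) ≤ min (PySem.Int.floordiv (PySem.Str.len s) 400) 2 := le_min hfd (by norm_num)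
    omega
  · have h2 : min (PySem.Int.floordiv (PySem.Str.len s) 400) 2 ≤ 2 := min_le_right _ _
    omega

theorem pv_score_mem_range (s : String) : pvScore s ∈ PySem.List.pyRange 10 (-1) (-1) := by
  have hb := pv_score_bounds s
  have hV : PySem.List.pyRange 10 (-1) (-1) = [10,9,8,7,6,5,4,3,2,1,0] := by decide
  rw [hV]
  simp only [List.mem_cons, List.not_mem_nil, or_false]
  omega

-- ===== VERDICT (by name: the statement is the Claim_ definition above) =====
theorem select_key_paragraphs_py_spec : Claim_equal_select_key_paragraphs_py := by
  intro paragraphs limit _hdom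
  unfold Spec_select_key_paragraphs_py select_key_paragraphs_py select_key_paragraphs_py_alt
  simp only []
  have hsort := pv_sorted_rev_eq_buckets (fun x : Int × String => x.1)
      (paragraphs.map (fun para => (pvScore para, para))) (PySem.List.pyRange 10 (-1) (-1))
      (by
        have hV : PySem.List.pyRange 10 (-1) (-1) = [10,9,8,7,6,5,4,3,2,1,0] := by decide
        rw [hV]; decide)
      (by
        intro x hx
        simp only [List.mem_map] at hx
        rcases hx with ⟨para, _, rfl⟩
        exact pv_score_mem_range para)
  rw [hsort]
  have hslice : ∀ (L : List (Int × String)) (b : Int),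
      (PySem.List.slice L none (some b)).map (fun x => x.2) =
        PySem.List.slice (L.map (fun x => x.2)) none (some b) := by
    intro L b
    simp [PySem.List.slice]
  rw [hslice, List.map_flatMap]
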